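-- pv_equiv track=rewrite | github.com/ykosuru/tal-ast | stp_module_ace_data_collector.py | _extract_party
-- ===== SOURCE A (Python) =====
-- from typing import Dict, List, Optional, Tuple, Set, Any
--
-- PARTY_SUFFIXES = ['ORGPTY', 'SNDBNK', 'DBTPTY', 'CDTPTY', 'INTBNK', 'BNFBNK', 'BNPPTY']
--
-- def _extract_party(info: str) -> Optional[str]:
--     """Extract party suffix from informational data."""
--     if not info:
--         return None
--
--     # Pattern: starts with party suffix
--     for suffix in PARTY_SUFFIXES:
--         if info.startswith(suffix):
--             return suffix
--
--     # Pattern: contains party suffix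
--     for suffix in PARTY_SUFFIXES:
--         if suffix in info:
--             return suffix
--
--     return None
-- ===== SOURCE B (Python) =====
-- from typing import Optional
--
-- PARTY_SUFFIXES = ['ORGPTY', 'SNDBNK', 'DBTPTY', 'CDTPTY', 'INTBNK', 'BNFBNK', 'BNPPTY']
--
-- def _extract_party(info: str) -> Optional[str]:
--     """Extract party suffix from informational data (single pass)."""
--     if not info:
--         return None
--     candidate = None
--     for suffix in PARTY_SUFFIXES:
--         if info.startswith(suffix):
--             return suffix
--         if candidate is None and suffix in info:
--             candidate = suffix
--     return candidate
-- ===== Notes on version B (the rewrite author's own statement) =====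
-- stated objective: simpler
-- what changed: The two sequential scans of PARTY_SUFFIXES (prefix pass, then containment pass) are collapsed into one pass that returns immediately on a prefix match and records the first containment match as a candidate returned at the end.
import Mathlib
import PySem

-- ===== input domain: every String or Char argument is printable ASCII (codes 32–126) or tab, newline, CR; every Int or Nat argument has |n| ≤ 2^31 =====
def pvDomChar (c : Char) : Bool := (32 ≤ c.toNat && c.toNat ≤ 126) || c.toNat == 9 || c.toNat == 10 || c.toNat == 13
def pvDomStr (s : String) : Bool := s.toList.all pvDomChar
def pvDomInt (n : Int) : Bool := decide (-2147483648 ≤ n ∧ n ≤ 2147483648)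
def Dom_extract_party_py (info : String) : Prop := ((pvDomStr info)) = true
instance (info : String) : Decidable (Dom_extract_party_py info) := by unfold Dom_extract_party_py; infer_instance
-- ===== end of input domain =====

-- ===== PORT A =====
-- single-pass B vs A's two sequential scans; equivalence of RETURN value proved on Dom
def PARTY_SUFFIXES : List String :=
  ["ORGPTY", "SNDBNK", "DBTPTY", "CDTPTY", "INTBNK", "BNFBNK", "BNPPTY"]

-- first loop of A: 'for suffix ...: if info.startswith(suffix): return suffix'
def aLoopStarts (info : String) : List String → Option String
  | [] => none
  | s :: rest => if PySem.Str.startswith info s then some s else aLoopStarts info rest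

-- second loop of A: 'for suffix ...: if suffix in info: return suffix'
def aLoopIn (info : String) : List String → Option String
  | [] => none
  | s :: rest => if PySem.Str.isIn s info then some s else aLoopIn info rest

def extract_party_py (info : String) : Option String :=
  if info = "" then none
  else
    match aLoopStarts info PARTY_SUFFIXES with
    | some s => some s
    | none => aLoopIn info PARTY_SUFFIXES

-- ===== PORT B =====
-- B's single loop with the 'candidate' accumulator
def bLoop (info : String) : List String → Option String → Option String
  | [], cand => cand
  | s :: rest, cand =>
    if PySem.Str.startswith info s then some s
    else bLoop info rest (if cand = none ∧ PySem.Str.isIn s info then some s else cand)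

def extract_party_py_alt (info : String) : Option String :=
  if info = "" then none else bLoop info PARTY_SUFFIXES none

-- ===== PRECONDITION & SPEC =====
def Spec_extract_party_py (info : String) (out : Option String) : Prop := out = extract_party_py_alt info
instance (info : String) (out : Option String) : Decidable (Spec_extract_party_py info out) := by unfold Spec_extract_party_py; infer_instance

-- ===== CLAIM =====
def Claim_equal_extract_party_py : Prop := ∀ (info : String), Dom_extract_party_py info → Spec_extract_party_py info (extract_party_py info)

-- ===== LEMMAS AND PROOFS =====
theorem bLoop_eq (info : String) (L : List String) (cand : Option String) :
    bLoop info L cand =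
      match aLoopStarts info L with
      | some s => some s
      | none => match cand with
        | some c => some c
        | none => aLoopIn info L := by
  induction L generalizing cand with
  | nil => cases cand <;> rfl
  | cons s rest ih =>
    simp only [bLoop, aLoopStarts, aLoopIn, PySem.Str.startswith, PySem.Str.isIn]
    by_cases hs : PySem.Chars.startswith info.toList s.toList = true
    · simp [hs]
    · simp only [hs, Bool.false_eq_true, if_false, ih]
      by_cases hc : PySem.Chars.isIn s.toList info.toList = true
      · cases cand <;> simp only [hc, if_true] <;>
          (cases aLoopStarts info rest <;> simp)
      · cases cand <;> simp [hc]

-- ===== VERDICT =====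
theorem extract_party_py_spec : Claim_equal_extract_party_py := by
  intro info _
  unfold Spec_extract_party_py extract_party_py extract_party_py_alt
  by_cases h : info = ""
  · simp [h]
  · rw [if_neg h, if_neg h, bLoop_eq]
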